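-- pv_equiv track=rewrite | github.com/MinhCreator/python_dev | source-code/HSG_exam/example for technical in python/chuyên đề xử lí string/find text bt 11.py | find_text
-- ===== SOURCE A (Python) =====
-- def find_text(string: str) -> str:
--
--     choose_num = ""
--     max_choose = ""
--     #choose num in string and find text in string remaning
--     for i in range(1, len(string) + 1):
--
--
--         choose_num = string[:i]
--
--         str_remain = string[i:]
--
--         if choose_num in str_remain:
--             max_choose = choose_num
--             position_choose = len(string) - len(str_remain) + str_remain.find(max_choose) + 1
--
--         else:
--             break
--
--
--
--     return len(max_choose), position_choose
-- ===== SOURCE B (Python) =====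
-- def find_text(string: str) -> str:
--     # Whether the length-i prefix occurs in s[i:] is monotone (an occurrence of a longer
--     # prefix contains one of every shorter prefix), so binary-search the largest such
--     # length instead of growing it one step at a time; then a single find locates the
--     # first occurrence.
--     s = string
--     n = len(s)
--     lo, hi = 0, n + 1    # invariant: prefix of length lo recurs; one of length hi does not
--     while hi - lo > 1:
--         mid = (lo + hi) // 2
--         if s[:mid] in s[mid:]:
--             lo = mid
--         else:
--             hi = mid
--     if lo == 0:
--         return 0, 0
--     return lo, s.find(s[:lo], lo) + 1
-- ===== Notes on version B (the rewrite author's own statement) =====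
-- stated objective: faster
-- what changed: A grows the candidate prefix by one character per iteration, re-running a substring search of the whole prefix each time; B binary-searches the largest recurring prefix length (valid because recurrence of a prefix is monotone in its length) and then locates its first occurrence with a single find.
import Mathlib
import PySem

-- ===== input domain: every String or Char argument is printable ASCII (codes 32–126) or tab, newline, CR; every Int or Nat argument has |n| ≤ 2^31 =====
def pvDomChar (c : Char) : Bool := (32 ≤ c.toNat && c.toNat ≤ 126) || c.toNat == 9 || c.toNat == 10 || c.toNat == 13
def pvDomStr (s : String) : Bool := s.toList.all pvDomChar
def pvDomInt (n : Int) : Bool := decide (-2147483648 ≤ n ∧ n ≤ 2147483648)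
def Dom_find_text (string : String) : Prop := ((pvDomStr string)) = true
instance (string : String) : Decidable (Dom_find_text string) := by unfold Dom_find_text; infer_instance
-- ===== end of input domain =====

-- B replaces A's grow-the-prefix-by-one-and-search loop by a binary search on the prefix
-- length (recurrence of a prefix is monotone in its length) plus a single find; the
-- returned pair is proved equal on Pre_ (outside Pre_ Python A raises NameError).

-- ===== PORT A =====
-- Python A's `for i in range(1, len(string)+1)` with `break`: recursion over the index list
-- (range(1, n+1) = List.range' 1 n; all slice bounds are nonnegative and ≤ len, so
-- s[:i] / s[i:] are take / drop, = PySem.List.slice on these bounds).  `position_choose`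
-- starts unbound in Python (NameError if returned unset — those inputs are excluded by
-- Pre_); it is carried here as an Int initialised to 0, never returned on Pre_.
def findTextLoopA (cs : List Char) : List Nat → (List Char × Int) → (List Char × Int)
  | [], st => st
  | i :: rest, st =>
    let choose := cs.take i                  -- choose_num = string[:i]
    let remain := cs.drop i                  -- str_remain = string[i:]
    if PySem.Chars.isIn choose remain then   -- if choose_num in str_remain
      findTextLoopA cs rest
        (choose, (cs.length : Int) - (remain.length : Int) + PySem.Chars.find remain choose + 1)
    else st                                  -- break

def find_text (string : String) : List Int :=
  let cs := string.toList
  let res := findTextLoopA cs (List.range' 1 cs.length) ([], 0)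
  [(res.1.length : Int), res.2]

-- ===== PORT B =====
-- the `while hi - lo > 1` loop; structural fuel = hi - lo is exact since the gap shrinks by
-- at least 1 per iteration.  (lo+hi)//2 on nonnegative ints is Nat division
-- (PySem.Int.floordiv_natCast); s[:mid] / s[mid:] are take / drop as in port A.
def findTextBisect (cs : List Char) : Nat → Nat → Nat → Nat × Nat
  | 0, lo, hi => (lo, hi)
  | fuel + 1, lo, hi =>
    if hi - lo > 1 then
      let mid := (lo + hi) / 2
      if PySem.Chars.isIn (cs.take mid) (cs.drop mid) then
        findTextBisect cs fuel mid hi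
      else
        findTextBisect cs fuel lo mid
    else (lo, hi)

def find_text_alt (string : String) : List Int :=
  let cs := string.toList
  let n := cs.length
  let lo := (findTextBisect cs (n + 1) 0 (n + 1)).1
  if lo = 0 then [0, 0]
  else [(lo : Int), PySem.Chars.findFrom cs (cs.take lo) (lo : Int) + 1]   -- s.find(s[:lo], lo) + 1

-- ===== PRECONDITION & SPEC =====
-- Pre_ excludes exactly the inputs where Python A raises NameError (position_choose unbound):
-- the empty string and strings whose first character does not occur again.
def Pre_find_text (string : String) : Prop :=
  string.toList.tail.contains (string.toList.headD ' ') = true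
instance (string : String) : Decidable (Pre_find_text string) := by
  unfold Pre_find_text; infer_instance

def pvWitness_find_text : String := "aa"

def Spec_find_text (string : String) (out : List Int) : Prop := out = find_text_alt string
instance (string : String) (out : List Int) : Decidable (Spec_find_text string out) := by
  unfold Spec_find_text; infer_instance

-- ===== CLAIM (what is proved, stated in full; the proofs are below) =====
def Claim_equal_find_text : Prop := ∀ (string : String), Dom_find_text string → Pre_find_text string → Spec_find_text string (find_text string)

-- ===== LEMMAS AND PROOFS =====

-- ---- proof-side abbreviations ----

-- the prefix of length i occurs at absolute position p (inside the remainder s[i:]).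
def OccAt (cs : List Char) (i p : Nat) : Prop :=
  i ≤ p ∧ p + i ≤ cs.length ∧ cs.take i <+: cs.drop p

-- A's loop test: the prefix of length i occurs in the remainder.
abbrev occB (cs : List Char) (i : Nat) : Prop :=
  PySem.Chars.isIn (cs.take i) (cs.drop i) = true

-- the greatest recurring prefix length (the L both programs return).
def bestL (cs : List Char) : Nat := Nat.findGreatest (occB cs) cs.length

-- A's recorded position expression at index i.
def posA (cs : List Char) (i : Nat) : Int :=
  (cs.length : Int) - ((cs.drop i).length : Int) + PySem.Chars.find (cs.drop i) (cs.take i) + 1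

-- ---- A's test ↔ some occurrence position ----
theorem occB_iff (cs : List Char) (i : Nat) (hi : 1 ≤ i) (hin : i ≤ cs.length) :
    occB cs i ↔ ∃ p, OccAt cs i p := by
  unfold occB
  rw [← PySem.Chars.exists_prefix_drop_iff_isIn]
  constructor
  · rintro ⟨j, hj⟩
    rw [List.drop_drop] at hj
    have hl := hj.length_le
    simp only [List.length_take, List.length_drop] at hl
    refine ⟨i + j, by omega, by omega, hj⟩
  · rintro ⟨p, hip, hpi, hpre⟩
    refine ⟨p - i, ?_⟩
    rw [List.drop_drop]
    rwa [Nat.add_sub_cancel' hip]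

theorem occB_mono (cs : List Char) {i j : Nat} (hij : j ≤ i) (hj : 1 ≤ j) (hin : i ≤ cs.length)
    (h : occB cs i) : occB cs j := by
  rw [occB_iff cs i (by omega) hin] at h
  rw [occB_iff cs j hj (by omega)]
  obtain ⟨p, hip, hpi, hpre⟩ := h
  refine ⟨p, by omega, by omega, ?_⟩
  calc cs.take j <+: cs.take i := by
        have := List.take_prefix j (cs.take i)
        rwa [List.take_take, Nat.min_eq_left hij] at this
    _ <+: cs.drop p := hpre

-- ---- A's loop runs to the greatest recurring length ----
theorem loopA_run (cs : List Char) :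
    occB cs 1 →
    ∀ (m i : Nat) (st : List Char × Int), m = cs.length + 1 - i → 1 ≤ i → i ≤ bestL cs + 1 →
      findTextLoopA cs (List.range' i m) st =
        if i ≤ bestL cs then (cs.take (bestL cs), posA cs (bestL cs)) else st := by
  intro hP1 m
  induction m with
  | zero =>
    intro i st hm h1 hL
    have hLn : bestL cs ≤ cs.length := Nat.findGreatest_le cs.length
    rw [if_neg (by omega)]
    rfl
  | succ m ih =>
    intro i st hm h1 hL
    have hin : i ≤ cs.length := by omega
    rw [List.range'_succ]
    rcases Nat.lt_or_ge (bestL cs) i with hgt | hle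
    · -- i = bestL + 1 ≤ n : the test fails, the loop breaks
      have hfail : ¬ occB cs i := Nat.findGreatest_is_greatest hgt hin
      simp only [findTextLoopA]
      rw [if_neg (by simpa [occB] using hfail), if_neg (by omega)]
    · -- i ≤ bestL : the test succeeds
      have hLpos : 1 ≤ bestL cs := by omega
      have hLn : bestL cs ≤ cs.length := Nat.findGreatest_le cs.length
      have hPL : occB cs (bestL cs) := Nat.findGreatest_spec (m := 1) (by omega) hP1
      have hPi : occB cs i := occB_mono cs hle h1 hLn hPL
      simp only [findTextLoopA]
      rw [if_pos (by simpa [occB] using hPi)]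
      rw [ih (i + 1) _ (by omega) (by omega) (by omega)]
      rcases Nat.lt_or_ge i (bestL cs) with hlt2 | hge2
      · rw [if_pos (by omega), if_pos (by omega)]
      · have : i = bestL cs := by omega
        subst this
        rw [if_neg (by omega), if_pos (le_refl _)]
        simp [posA]

-- ---- B's binary search ----
theorem occB_le_length (cs : List Char) (hne : cs ≠ []) {i : Nat} (h : occB cs i) :
    i ≤ cs.length := by
  by_contra hgt
  unfold occB at h
  rw [PySem.Chars.isIn_iff_infix, List.take_of_length_le (by omega),
    List.drop_eq_nil_of_le (by omega), List.infix_nil] at h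
  exact hne h

theorem bisect_spec (cs : List Char) :
    ∀ (fuel lo hi : Nat), occB cs lo → ¬ occB cs hi → lo < hi → hi - lo ≤ fuel →
      occB cs (findTextBisect cs fuel lo hi).1 ∧
      ¬ occB cs ((findTextBisect cs fuel lo hi).1 + 1) := by
  intro fuel
  induction fuel with
  | zero => intro lo hi _ _ hlt hf; omega
  | succ f ih =>
    intro lo hi hlo hhi hlt hf
    by_cases hgap : hi - lo > 1
    · have hmid1 : lo < (lo + hi) / 2 := by omega
      have hmid2 : (lo + hi) / 2 < hi := by omega
      by_cases hm : occB cs ((lo + hi) / 2)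
      · have heq : findTextBisect cs (f + 1) lo hi = findTextBisect cs f ((lo + hi) / 2) hi := by
          simp only [findTextBisect, if_pos hgap]
          rw [if_pos hm]
        rw [heq]
        exact ih _ hi hm hhi hmid2 (by omega)
      · have heq : findTextBisect cs (f + 1) lo hi = findTextBisect cs f lo ((lo + hi) / 2) := by
          simp only [findTextBisect, if_pos hgap]
          rw [if_neg (by simpa [occB] using hm)]
        rw [heq]
        exact ih lo _ hlo hm hmid1 (by omega)
    · have heq : findTextBisect cs (f + 1) lo hi = (lo, hi) := by
        simp only [findTextBisect, if_neg hgap]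
      rw [heq]
      have : hi = lo + 1 := by omega
      subst this
      exact ⟨hlo, hhi⟩

-- ---- the main equation ----
theorem main_eq (string : String)
    (h : string.toList.tail.contains (string.toList.headD ' ') = true) :
    find_text string = find_text_alt string := by
  obtain ⟨c, rest, hcs⟩ : ∃ c rest, string.toList = c :: rest := by
    cases hx : string.toList with
    | nil => rw [hx] at h; simp at h
    | cons c rest => exact ⟨c, rest, rfl⟩
  set cs := string.toList with hcsdef
  have hne : cs ≠ [] := by rw [hcs]; simp
  have hmem : c ∈ rest := by
    rw [hcs] at h; simpa using h
  set n := cs.length with hn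
  have h1n : 1 ≤ n := by rw [hn, hcs]; simp
  have hP1 : occB cs 1 := by
    unfold occB
    rw [PySem.Chars.isIn_iff_infix, hcs]
    obtain ⟨s, t, rfl⟩ := List.append_of_mem hmem
    exact ⟨s, t, by simp⟩
  set L := bestL cs with hLdef
  have hL1 : 1 ≤ L := Nat.le_findGreatest h1n hP1
  have hLn : L ≤ n := Nat.findGreatest_le cs.length
  -- A's side
  have hA : find_text string = [(L : Int), posA cs L] := by
    simp only [find_text]
    rw [loopA_run cs hP1 cs.length 1 ([], 0) (by omega) (le_refl 1) (by omega), if_pos hL1]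
    simp only [List.length_take]
    rw [← hLdef, Nat.min_eq_left hLn]
  have hPL : occB cs L := Nat.findGreatest_spec (m := 1) (hn ▸ h1n) hP1
  -- B's binary search lands exactly on L
  have hocc0 : occB cs 0 := by
    unfold occB
    simp [PySem.Chars.isIn_nil]
  have hnotTop : ¬ occB cs (n + 1) := fun hx => by
    have := occB_le_length cs hne hx
    omega
  obtain ⟨hlo, hlo1⟩ := bisect_spec cs (n + 1) 0 (n + 1) hocc0 hnotTop (by omega) (by omega)
  set lo := (findTextBisect cs (n + 1) 0 (n + 1)).1 with hlodef
  have hloL : lo = L := by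
    have hle : lo ≤ L := Nat.le_findGreatest (hn ▸ occB_le_length cs hne hlo) hlo
    rcases Nat.lt_or_ge lo L with hlt | hge
    · exact absurd (occB_mono cs (by omega : lo + 1 ≤ L) (by omega) (hn ▸ hLn) hPL) hlo1
    · omega
  -- B's find equals A's find on the remainder
  have hinf : cs.take L <:+: cs.drop L := by
    have := hPL; unfold occB at this
    rwa [PySem.Chars.isIn_iff_infix] at this
  set fd := PySem.Chars.find (cs.drop L) (cs.take L) with hfd
  have hfd0 : 0 ≤ fd := (PySem.Chars.find_nonneg_iff _ _).2 hinf
  have hff : PySem.Chars.findFrom cs (cs.take L) (L : Int) = (L : Int) + fd := by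
    rw [PySem.Chars.findFrom_natCast cs (cs.take L) L (hn ▸ hLn)]
    rw [if_neg (by omega)]
  have hB : find_text_alt string = [(L : Int), (L : Int) + fd + 1] := by
    simp only [find_text_alt]
    rw [← hcsdef, ← hn, ← hlodef, hloL]
    rw [if_neg (by omega), hff]
  rw [hA, hB]
  -- the two position expressions agree
  have hdl : ((cs.drop L).length : Int) = (n : Int) - (L : Int) := by
    simp only [List.length_drop]; omega
  simp only [posA, ← hfd, hdl]
  congr 1
  congr 1
  omega

-- ===== VERDICT (by name: the statement is the Claim_ definition above) =====
theorem find_text_spec : Claim_equal_find_text := by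
  intro string _ hpre
  unfold Pre_find_text at hpre
  unfold Spec_find_text
  exact main_eq string hpre
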